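-- pv_equiv track=rewrite | github.com/conradylx/Python_Basic | 14.04.2021/exc2/exc2.py | multiply_by_5_or_7
-- ===== SOURCE A (Python) =====
-- def multiply_by_5_or_7(number, result, multi, sum):
--     sum += result
--
--     if result < number:
--         return multiply_by_5_or_7(number, result * multi, multi, sum)
--     elif result == number:
--         return sum
--     else:
--         sum -= result
--         return sum
-- ===== SOURCE B (Python) =====
-- def multiply_by_5_or_7(number, result, multi, sum):
--     # Phase 1: find the first k with result*multi**k >= number (the term the
--     # recursion stops at), without accumulating anything.
--     term = result
--     k = 0
--     while term < number:
--         term *= multi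
--         k += 1
--     # Phase 2: closed-form geometric sum of the k+1 terms that were added.
--     if multi == 1:
--         total = sum + result * (k + 1)
--     else:
--         total = sum + (result * (multi ** (k + 1) - 1)) // (multi - 1)
--     if term == number:
--         return total
--     return total - term
-- ===== Notes on version B (the rewrite author's own statement) =====
-- stated objective: alternative
-- what changed: A accumulates the running sum inside a tail recursion; B first runs a bare loop to find the step count k and the crossing term, then computes the whole sum in closed form as the geometric series result*(multi**(k+1)-1)//(multi-1) and adjusts the final term.
import Mathlib
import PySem

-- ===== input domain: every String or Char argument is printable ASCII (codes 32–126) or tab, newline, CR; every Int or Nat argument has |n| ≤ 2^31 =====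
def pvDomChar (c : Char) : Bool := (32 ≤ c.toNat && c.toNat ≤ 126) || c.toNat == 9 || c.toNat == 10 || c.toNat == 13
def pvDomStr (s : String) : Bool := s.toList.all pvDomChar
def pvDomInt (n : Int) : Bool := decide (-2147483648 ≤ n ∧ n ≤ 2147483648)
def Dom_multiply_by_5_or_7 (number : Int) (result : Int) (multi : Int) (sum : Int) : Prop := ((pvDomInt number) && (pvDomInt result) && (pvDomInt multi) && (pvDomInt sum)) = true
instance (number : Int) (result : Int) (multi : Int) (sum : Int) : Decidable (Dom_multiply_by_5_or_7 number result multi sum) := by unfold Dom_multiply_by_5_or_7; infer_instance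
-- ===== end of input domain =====

-- B replaces A's per-step accumulation by a two-phase computation (find the crossing
-- step, then a closed-form geometric sum); objective: alternative decomposition.

-- ===== PORT A =====
-- A is an unbounded tail recursion; the fuel guard only makes it total (fuel 100
-- exceeds the ≤ 33 steps any input inside Dom ∧ Pre_ needs), it adds no algorithm.
def pvGoA : Nat → Int → Int → Int → Int → Int
  | 0, _, _, _, _ => 0
  | f + 1, number, result, multi, sum =>
    let sum' := sum + result
    if result < number then pvGoA f number (result * multi) multi sum'
    else if result = number then sum'
    else sum' - result

def multiply_by_5_or_7 (number : Int) (result : Int) (multi : Int) (sum : Int) : Int :=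
  pvGoA 100 number result multi sum

-- ===== PORT B =====
-- phase 1 of Source B: the while-loop finding the first term ≥ number (fuel likewise
-- only for totality); returns (k, term).
def pvGoB : Nat → Int → Int → Int → Int → Option (Int × Int)
  | 0, _, _, _, _ => none
  | f + 1, number, term, multi, k =>
    if term < number then pvGoB f number (term * multi) multi (k + 1)
    else some (k, term)

-- phase 2 of Source B: the closed-form geometric sum of the k+1 terms
-- (Python // ported as PySem.Int.floordiv; k ≥ 0 always, so (k+1).toNat is exact).
def pvTotal (result : Int) (multi : Int) (sum : Int) (k : Int) : Int :=
  if multi = 1 then sum + result * (k + 1)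
  else sum + PySem.Int.floordiv (result * (multi ^ (k + 1).toNat - 1)) (multi - 1)

def multiply_by_5_or_7_alt (number : Int) (result : Int) (multi : Int) (sum : Int) : Int :=
  match pvGoB 100 number result multi 0 with
  | none => 0
  | some (k, term) =>
    if term = number then pvTotal result multi sum k
    else pvTotal result multi sum k - term

-- ===== PRECONDITION & SPEC =====
-- Pre_ excludes exactly the inputs on which A never reaches its base case and
-- raises RecursionError (result stuck below number: multi = 1, result = 0,
-- negative non-growing sequences, …); A returns on every other input in Dom.
def Pre_multiply_by_5_or_7 (number : Int) (result : Int) (multi : Int) (sum : Int) : Prop :=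
  number ≤ result ∨ (1 ≤ result ∧ 2 ≤ multi) ∨ (result ≠ 0 ∧ multi ≤ -2) ∨
    (multi = -1 ∧ number ≤ -result) ∨ (multi = 0 ∧ number ≤ 0)
instance (number : Int) (result : Int) (multi : Int) (sum : Int) : Decidable (Pre_multiply_by_5_or_7 number result multi sum) := by unfold Pre_multiply_by_5_or_7; infer_instance

def pvWitness_multiply_by_5_or_7 : Int × Int × Int × Int := (10, 1, 2, 0)

def Spec_multiply_by_5_or_7 (number : Int) (result : Int) (multi : Int) (sum : Int) (out : Int) : Prop := out = multiply_by_5_or_7_alt number result multi sum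
instance (number : Int) (result : Int) (multi : Int) (sum : Int) (out : Int) : Decidable (Spec_multiply_by_5_or_7 number result multi sum out) := by unfold Spec_multiply_by_5_or_7; infer_instance

-- ===== CLAIM (what is proved, stated in full; the proofs are below) =====
def Claim_equal_multiply_by_5_or_7 : Prop := ∀ (number : Int) (result : Int) (multi : Int) (sum : Int), Dom_multiply_by_5_or_7 number result multi sum → Pre_multiply_by_5_or_7 number result multi sum → Spec_multiply_by_5_or_7 number result multi sum (multiply_by_5_or_7 number result multi sum)

-- ===== LEMMAS AND PROOFS =====

lemma pvGoB_shift (f : Nat) : ∀ (n t m k : Int),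
    pvGoB f n t m k = (pvGoB f n t m 0).map (fun p => (p.1 + k, p.2)) := by
  induction f with
  | zero => intro n t m k; simp [pvGoB]
  | succ f ih =>
    intro n t m k
    by_cases h : t < n
    · simp only [pvGoB, if_pos h]
      rw [ih n (t * m) m (k + 1), ih n (t * m) m (0 + 1)]
      cases pvGoB f n (t * m) m 0 with
      | none => simp
      | some p => simp [Option.map]; ring
    · simp [pvGoB, if_neg h]

lemma pvGoB_k_ge (f : Nat) : ∀ (n t m k0 k term : Int),
    pvGoB f n t m k0 = some (k, term) → k0 ≤ k := by
  induction f with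
  | zero => intro n t m k0 k term h; simp [pvGoB] at h
  | succ f ih =>
    intro n t m k0 k term h
    by_cases hlt : t < n
    · simp only [pvGoB, if_pos hlt] at h
      have := ih n (t * m) m (k0 + 1) k term h
      omega
    · simp [pvGoB, if_neg hlt] at h
      omega

lemma floordiv_mul_self (d q : Int) (hd : d ≠ 0) :
    PySem.Int.floordiv (d * q) d = q := by
  have hmod : PySem.Int.mod (d * q) d = 0 :=
    (PySem.Int.mod_eq_zero_iff_dvd _ _).2 ⟨q, rfl⟩
  have h := PySem.Int.floordiv_mul_add_mod (d * q) d
  rw [hmod, add_zero] at h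
  have : PySem.Int.floordiv (d * q) d * d = q * d := by rw [h]; ring
  exact mul_right_cancel₀ hd this

lemma dvd_pow_sub_one (m : Int) (i : Nat) : (m - 1) ∣ (m ^ i - 1) := by
  have := sub_dvd_pow_sub_pow m 1 i
  simpa using this

lemma pvTotal_zero (r m s : Int) : pvTotal r m s 0 = s + r := by
  by_cases hm : m = 1
  · simp [pvTotal, hm]
  · have hd : m - 1 ≠ 0 := sub_ne_zero.2 hm
    simp only [pvTotal, if_neg hm]
    have : r * (m ^ (0 + 1 : Int).toNat - 1) = (m - 1) * r := by norm_num; ring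
    rw [this, floordiv_mul_self _ _ hd]

lemma pvTotal_step (r m s k : Int) (hk : 0 ≤ k) :
    pvTotal r m s (k + 1) = pvTotal (r * m) m (s + r) k := by
  by_cases hm : m = 1
  · simp [pvTotal, hm]; ring
  · have hd : m - 1 ≠ 0 := sub_ne_zero.2 hm
    simp only [pvTotal, if_neg hm]
    obtain ⟨j, rfl⟩ : ∃ j : Nat, k = (j : Int) := ⟨k.toNat, (Int.toNat_of_nonneg hk).symm⟩
    have h1 : ((j : Int) + 1 + 1).toNat = j + 2 := by omega
    have h2 : ((j : Int) + 1).toNat = j + 1 := by omega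
    rw [h1, h2]
    obtain ⟨q, hq⟩ := dvd_pow_sub_one m (j + 1)
    have hb : r * m * (m ^ (j + 1) - 1) = (m - 1) * (r * m * q) := by rw [hq]; ring
    have ha : r * (m ^ (j + 2) - 1) = (m - 1) * (r + r * m * q) := by
      have : m ^ (j + 2) = m * m ^ (j + 1) := by ring
      rw [this]
      have : m * m ^ (j + 1) - 1 = (m - 1) + m * (m ^ (j + 1) - 1) := by ring
      rw [this]
      have hq' : m * (m ^ (j + 1) - 1) = m * ((m - 1) * q) := by rw [hq]
      rw [mul_add, hq']; ring
    rw [ha, hb, floordiv_mul_self _ _ hd, floordiv_mul_self _ _ hd]; ring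

lemma pvGo_key (f : Nat) : ∀ (n r m s : Int),
    pvGoA f n r m s =
      (match pvGoB f n r m 0 with
       | none => 0
       | some (k, term) =>
         if term = n then pvTotal r m s k else pvTotal r m s k - term) := by
  induction f with
  | zero => intro n r m s; simp [pvGoA, pvGoB]
  | succ f ih =>
    intro n r m s
    by_cases h : r < n
    · have hA : pvGoA (f + 1) n r m s = pvGoA f n (r * m) m (s + r) := by
        simp [pvGoA, if_pos h]
      have hB : pvGoB (f + 1) n r m 0 = pvGoB f n (r * m) m 1 := by
        simp [pvGoB, if_pos h]
      rw [hA, hB, ih n (r * m) m (s + r),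
        pvGoB_shift f n (r * m) m 1]
      cases hb : pvGoB f n (r * m) m 0 with
      | none => simp
      | some p =>
        obtain ⟨k, term⟩ := p
        have hk : (0 : Int) ≤ k := pvGoB_k_ge f n (r * m) m 0 k term hb
        simp only [Option.map]
        rw [pvTotal_step r m s k hk]
    · have hb : pvGoB (f + 1) n r m 0 = some (0, r) := by
        simp [pvGoB, if_neg h]
      rw [hb]
      by_cases he : r = n
      · simp [pvGoA, he, pvTotal_zero]
      · simp [pvGoA, if_neg h, he, pvTotal_zero]

-- ===== VERDICT (by name: the statement is the Claim_ definition above) =====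
theorem multiply_by_5_or_7_spec : Claim_equal_multiply_by_5_or_7 := by
  intro number result multi sum _ _
  unfold Spec_multiply_by_5_or_7 multiply_by_5_or_7 multiply_by_5_or_7_alt
  exact pvGo_key 100 number result multi sum
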